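-- pv_equiv track=rewrite | github.com/galettof/VietorisRipsHypercube | Python/matrix_generator.py | initial_bag
-- ===== SOURCE A (Python) =====
-- def initial_bag(p=5):
--     # the vertex with all zero entries
--     def zeros():
--         return (0,) * p
--
--     # the vertices v_i of Prop. 6.1
--     def middle_pattern(i):
--         return (1, 1) + (0,) * i + (1,) + (0,) * (p - 3 - i)
--
--     # the vertices w_i of Prop 6.1
--     def edge_pattern(k):
--         return (1,) + (0,) * (p - k - 1) + (1,) + (0,) * (k - 1)
--
--     bags = [
--         (zeros(),) + tuple(middle_pattern(i) for i in range(p - 2)),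
--         (zeros(), edge_pattern(1)) + tuple(middle_pattern(i) for i in range(p - 3)),
--         (zeros(), edge_pattern(2), edge_pattern(1)) + tuple(middle_pattern(i) for i in range(p - 4)),
--     ]
--
--     if p >= 9:
--         bags.append(
--             (zeros(), edge_pattern(3), edge_pattern(2), edge_pattern(1))
--             + tuple(middle_pattern(i) for i in range(p - 5))
--         )
--
--     return tuple(bags)
-- ===== SOURCE B (Python) =====
-- def initial_bag(p=5):
--     # the vertex with all zero entries
--     def zeros():
--         return (0,) * p
--
--     # the vertices v_i of Prop. 6.1
--     def middle_pattern(i):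
--         return (1, 1) + (0,) * i + (1,) + (0,) * (p - 3 - i)
--
--     # the vertices w_i of Prop 6.1
--     def edge_pattern(k):
--         return (1,) + (0,) * (p - k - 1) + (1,) + (0,) * (k - 1)
--
--     # Incremental construction: start from the full run of middle patterns and no
--     # edge patterns; after emitting each bag, prepend the next edge pattern and
--     # drop the last middle pattern (if any).
--     middles = [middle_pattern(i) for i in range(p - 2)]
--     edges = []
--     bags = []
--     for j in range(1, 5 if p >= 9 else 4):
--         bags.append((zeros(),) + tuple(edges) + tuple(middles))
--         edges.insert(0, edge_pattern(j))
--         if middles: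
--             middles.pop()
--     return tuple(bags)
-- ===== Notes on version B (the rewrite author's own statement) =====
-- stated objective: alternative
-- what changed: Replaces A's three hand-written literal bag tuples plus the conditional fourth append with an incremental single loop over mutable state: start from all middle patterns and no edge patterns, emit a bag each iteration, then prepend the next edge pattern and pop the last middle pattern.
import Mathlib
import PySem

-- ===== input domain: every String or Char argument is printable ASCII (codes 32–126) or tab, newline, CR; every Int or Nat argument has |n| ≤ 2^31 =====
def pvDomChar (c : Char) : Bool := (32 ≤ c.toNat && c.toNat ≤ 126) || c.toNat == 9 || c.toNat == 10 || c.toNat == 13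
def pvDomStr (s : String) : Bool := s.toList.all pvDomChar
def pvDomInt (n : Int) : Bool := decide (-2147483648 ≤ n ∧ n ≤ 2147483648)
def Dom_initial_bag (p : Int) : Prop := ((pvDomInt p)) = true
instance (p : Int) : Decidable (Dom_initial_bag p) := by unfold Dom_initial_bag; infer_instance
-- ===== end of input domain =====

-- B replaces A's literal bag tuples with one incremental loop over mutable state
-- (prepend an edge pattern, pop a middle pattern per bag); objective: alternative.

-- shared helper closures (identical in A and B)
-- (0,) * n : Python's tuple repetition gives () for n ≤ 0; Int.toNat clamps the same way, exact.
def pvRep (n : Int) : List Int := List.replicate n.toNat 0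

def pvZeros (p : Int) : List Int := pvRep p

def pvMiddle (p i : Int) : List Int := [1, 1] ++ pvRep i ++ [1] ++ pvRep (p - 3 - i)

def pvEdge (p k : Int) : List Int := [1] ++ pvRep (p - k - 1) ++ [1] ++ pvRep (k - 1)

-- ===== PORT A =====
def initial_bag (p : Int) : List (List (List Int)) :=
  let bags : List (List (List Int)) :=
    [ [pvZeros p] ++ (PySem.List.pyRange 0 (p - 2) 1).map (pvMiddle p)
    , [pvZeros p, pvEdge p 1] ++ (PySem.List.pyRange 0 (p - 3) 1).map (pvMiddle p)
    , [pvZeros p, pvEdge p 2, pvEdge p 1] ++ (PySem.List.pyRange 0 (p - 4) 1).map (pvMiddle p) ]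
  if p ≥ 9 then
    bags ++ [[pvZeros p, pvEdge p 3, pvEdge p 2, pvEdge p 1]
             ++ (PySem.List.pyRange 0 (p - 5) 1).map (pvMiddle p)]
  else bags

-- ===== PORT B =====
-- loop state: (edges, middles, bags); 'middles.pop()' guarded by 'if middles' = dropLast on nonempty
def initial_bag_alt (p : Int) : List (List (List Int)) :=
  let middles0 := (PySem.List.pyRange 0 (p - 2) 1).map (pvMiddle p)
  let st := (PySem.List.pyRange 1 (if p ≥ 9 then 5 else 4) 1).foldl
    (fun (st : List (List Int) × List (List Int) × List (List (List Int))) j =>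
      let (edges, middles, bags) := st
      let bags := bags ++ [[pvZeros p] ++ edges ++ middles]
      let edges := pvEdge p j :: edges
      let middles := if middles = [] then middles else middles.dropLast
      (edges, middles, bags))
    ([], middles0, [])
  st.2.2

-- ===== PRECONDITION & SPEC =====
def Spec_initial_bag (p : Int) (out : List (List (List Int))) : Prop := out = initial_bag_alt p
instance (p : Int) (out : List (List (List Int))) : Decidable (Spec_initial_bag p out) := by unfold Spec_initial_bag; infer_instance

-- ===== CLAIM (what is proved, stated in full; the proofs are below) =====
def Claim_equal_initial_bag : Prop := ∀ (p : Int), Dom_initial_bag p → Spec_initial_bag p (initial_bag p)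

-- ===== LEMMAS AND PROOFS =====

-- dropping the last middle pattern shortens the run by one
theorem pv_drop_middle (p n : Int) :
    (if ((PySem.List.pyRange 0 n 1).map (pvMiddle p)) = [] then
        ((PySem.List.pyRange 0 n 1).map (pvMiddle p))
     else ((PySem.List.pyRange 0 n 1).map (pvMiddle p)).dropLast)
    = (PySem.List.pyRange 0 (n - 1) 1).map (pvMiddle p) := by
  by_cases h : n ≤ 0
  · rw [PySem.List.pyRange_one_eq_nil (by omega), PySem.List.pyRange_one_eq_nil (by omega)]
    simp
  · have hs : PySem.List.pyRange 0 n 1 = PySem.List.pyRange 0 (n - 1) 1 ++ [n - 1] := by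
      have := PySem.List.pyRange_one_succ_right (a := 0) (b := n - 1) (by omega)
      simpa [show n - 1 + 1 = n from by ring] using this
    rw [hs]
    simp

-- ===== VERDICT (by name: the statement is the Claim_ definition above) =====
theorem initial_bag_spec : Claim_equal_initial_bag := by
  intro p _
  unfold Spec_initial_bag initial_bag initial_bag_alt
  by_cases h : p ≥ 9 <;>
    simp only [h, if_true, if_false,
      show PySem.List.pyRange 1 5 1 = [1,2,3,4] from by decide,
      show PySem.List.pyRange 1 4 1 = [1,2,3] from by decide,
      List.foldl_cons, List.foldl_nil] <;>
    simp only [pv_drop_middle,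
      show p - 2 - 1 = p - 3 from by ring,
      show p - 3 - 1 = p - 4 from by ring,
      show p - 4 - 1 = p - 5 from by ring] <;>
    simp
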